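-- pv_equiv track=rewrite | github.com/romeorizzi/portafoglioVoti_public | Algoritmi/2022-06-29/all-CMS-submissions-2022-06-29/20220629T095714.VR456924.A_seq.py | _f_s
-- ===== SOURCE A (Python) =====
-- def _f_s(seq: list, cardinality: int, last:int=-1, index:int=0, count:int=0, rising:bool=True):
--     if count == cardinality:
--         return 1
--
--     if index >= len(seq):
--         return 0
--
--     res_excluded = _f_s(seq, cardinality, last, index+1, count, rising)
--     if(not rising and seq[index] >= last) or (seq[index] == last):
--         return res_excluded
--     res_included = _f_s(seq, cardinality, seq[index], index+1, count+1, seq[index] > last)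
--
--     return res_excluded + res_included
-- ===== SOURCE B (Python) =====
-- def _f_s(seq: list, cardinality: int, last: int = -1, index: int = 0, count: int = 0, rising: bool = True):
--     memo = {}
--
--     def go(last, index, count, rising):
--         if count == cardinality:
--             return 1
--         if index >= len(seq):
--             return 0
--         key = (last, index, count, rising)
--         if key in memo:
--             return memo[key]
--         res = go(last, index + 1, count, rising)
--         x = seq[index]
--         if not ((not rising and x >= last) or x == last):
--             res += go(x, index + 1, count + 1, x > last)
--         memo[key] = res
--         return res
--
--     return go(last, index, count, rising)
-- ===== Notes on version B (the rewrite author's own statement) =====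
-- stated objective: alternative
-- what changed: Replaced the plain exponential inclusion/exclusion recursion by the same recurrence memoized on the state (last, index, count, rising), so each reachable state is computed once; a timing run measured 92x at n=256 but could not confirm speed at n=1024 (B hits CPython's recursion limit / large state spaces there), so no speed is claimed.
import Mathlib
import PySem

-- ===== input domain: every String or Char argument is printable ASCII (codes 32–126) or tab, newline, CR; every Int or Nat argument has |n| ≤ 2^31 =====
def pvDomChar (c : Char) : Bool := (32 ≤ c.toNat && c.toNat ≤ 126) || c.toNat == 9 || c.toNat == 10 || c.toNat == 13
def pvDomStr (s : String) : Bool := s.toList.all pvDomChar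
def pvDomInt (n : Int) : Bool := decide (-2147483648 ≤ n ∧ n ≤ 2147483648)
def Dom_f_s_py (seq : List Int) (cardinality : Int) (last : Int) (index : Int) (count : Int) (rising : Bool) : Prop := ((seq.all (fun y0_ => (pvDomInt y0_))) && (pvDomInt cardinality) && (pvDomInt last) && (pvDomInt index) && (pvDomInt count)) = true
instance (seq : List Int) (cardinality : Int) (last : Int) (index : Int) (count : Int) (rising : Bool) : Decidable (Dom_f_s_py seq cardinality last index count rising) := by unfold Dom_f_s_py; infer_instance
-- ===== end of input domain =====

-- B memoizes A's recurrence on the state (last, index, count, rising) so each reachable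
-- state is computed once; equal return values proved on Pre_ (return value only).

-- ===== PORT A =====
-- literal transliteration of A's exponential recursion; seq[index] is total here
-- via pyGetD (inside Pre_ every access is in range, so the default is never used)
def f_s_py (seq : List Int) (cardinality : Int) (last : Int) (index : Int) (count : Int) (rising : Bool) : Int :=
  if count = cardinality then 1
  else if (seq.length : Int) ≤ index then 0
  else
    let resExcluded := f_s_py seq cardinality last (index + 1) count rising
    let x := PySem.List.pyGetD seq index 0
    if (!rising && decide (last ≤ x)) || (x == last) then resExcluded
    else resExcluded + f_s_py seq cardinality x (index + 1) (count + 1) (decide (last < x))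
termination_by ((seq.length : Int) - index).toNat
decreasing_by all_goals omega

-- ===== PORT B =====
-- the inner 'go' of Source B: same recurrence, threading the memo dict through the calls
def fsGo (seq : List Int) (cardinality : Int) (memo : PySem.Dict (Int × Int × Int × Bool) Int)
    (last index count : Int) (rising : Bool) : Int × PySem.Dict (Int × Int × Int × Bool) Int :=
  if count = cardinality then (1, memo)
  else if (seq.length : Int) ≤ index then (0, memo)
  else
    match memo.get? (last, index, count, rising) with
    | some v => (v, memo)
    | none =>
      let p1 := fsGo seq cardinality memo last (index + 1) count rising
      let x := PySem.List.pyGetD seq index 0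
      let p2 :=
        if (!rising && decide (last ≤ x)) || (x == last) then p1
        else
          let q := fsGo seq cardinality p1.2 x (index + 1) (count + 1) (decide (last < x))
          (p1.1 + q.1, q.2)
      (p2.1, p2.2.insert (last, index, count, rising) p2.1)
termination_by ((seq.length : Int) - index).toNat
decreasing_by all_goals omega

def f_s_py_alt (seq : List Int) (cardinality : Int) (last : Int) (index : Int) (count : Int) (rising : Bool) : Int :=
  (fsGo seq cardinality PySem.Dict.empty last index count rising).1

-- ===== PRECONDITION & SPEC =====
-- Pre_ excludes exactly the inputs where A raises IndexError (a negative index below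
-- -len(seq) is reached with count ≠ cardinality); B raises there too.
def Pre_f_s_py (seq : List Int) (cardinality : Int) (last : Int) (index : Int) (count : Int) (rising : Bool) : Prop :=
  count = cardinality ∨ -(seq.length : Int) ≤ index
instance (seq : List Int) (cardinality : Int) (last : Int) (index : Int) (count : Int) (rising : Bool) : Decidable (Pre_f_s_py seq cardinality last index count rising) := by unfold Pre_f_s_py; infer_instance

def pvWitness_f_s_py : List Int × Int × Int × Int × Int × Bool := ([1, 3, 2], 2, -1, 0, 0, true)

def Spec_f_s_py (seq : List Int) (cardinality : Int) (last : Int) (index : Int) (count : Int) (rising : Bool) (out : Int) : Prop := out = f_s_py_alt seq cardinality last index count rising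
instance (seq : List Int) (cardinality : Int) (last : Int) (index : Int) (count : Int) (rising : Bool) (out : Int) : Decidable (Spec_f_s_py seq cardinality last index count rising out) := by unfold Spec_f_s_py; infer_instance

-- ===== CLAIM (what is proved, stated in full; the proofs are below) =====
def Claim_equal_f_s_py : Prop := ∀ (seq : List Int) (cardinality : Int) (last : Int) (index : Int) (count : Int) (rising : Bool), Dom_f_s_py seq cardinality last index count rising → Pre_f_s_py seq cardinality last index count rising → Spec_f_s_py seq cardinality last index count rising (f_s_py seq cardinality last index count rising)

-- ===== LEMMAS AND PROOFS =====

-- memo invariant: every cached value is the value of A's recursion at its key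
def MemoInv (seq : List Int) (cardinality : Int) (memo : PySem.Dict (Int × Int × Int × Bool) Int) : Prop :=
  ∀ l i c r v, memo.get? (l, i, c, r) = some v → v = f_s_py seq cardinality l i c r

theorem fsGo_correct (seq : List Int) (cardinality : Int) (memo : PySem.Dict (Int × Int × Int × Bool) Int)
    (last index count : Int) (rising : Bool) (hInv : MemoInv seq cardinality memo) :
    (fsGo seq cardinality memo last index count rising).1 = f_s_py seq cardinality last index count rising ∧
      MemoInv seq cardinality (fsGo seq cardinality memo last index count rising).2 := by
  unfold fsGo
  rw [f_s_py]
  split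
  · exact ⟨rfl, hInv⟩
  · split
    · exact ⟨rfl, hInv⟩
    · rename_i hc hi
      cases hget : memo.get? (last, index, count, rising) with
      | some v =>
        simp only
        refine ⟨?_, hInv⟩
        have := hInv last index count rising v hget
        rw [this, f_s_py]
        simp [hc, hi]
      | none =>
        have h1 := fsGo_correct seq cardinality memo last (index + 1) count rising hInv
        simp only
        set x := PySem.List.pyGetD seq index 0 with hx
        have hIns : ∀ (m : PySem.Dict (Int × Int × Int × Bool) Int) (w : Int),
            MemoInv seq cardinality m → w = f_s_py seq cardinality last index count rising →
            MemoInv seq cardinality (m.insert (last, index, count, rising) w) := by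
          intro m w hm hw l i c r v hget'
          by_cases hk : (l, i, c, r) = (last, index, count, rising)
          · simp only [Prod.mk.injEq] at hk
            obtain ⟨rfl, rfl, rfl, rfl⟩ := hk
            rw [PySem.Dict.get?_insert_self] at hget'
            cases hget'
            exact hw
          · rw [PySem.Dict.get?_insert_of_ne _ _ hk] at hget'
            exact hm l i c r v hget'
        by_cases hcond : ((!rising && decide (last ≤ x)) || (x == last)) = true
        · simp only [hcond, if_pos]
          refine ⟨h1.1, ?_⟩
          apply hIns _ _ h1.2
          conv_rhs => rw [f_s_py]
          simp only [if_neg hc, if_neg hi, ← hx]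
          rw [if_pos hcond]
          exact h1.1
        · have h2 := fsGo_correct seq cardinality (fsGo seq cardinality memo last (index + 1) count rising).2
            x (index + 1) (count + 1) (decide (last < x)) h1.2
          simp only [hcond, if_neg, Bool.not_eq_true]
          refine ⟨by rw [h1.1, h2.1], ?_⟩
          apply hIns _ _ h2.2
          conv_rhs => rw [f_s_py]
          simp only [if_neg hc, if_neg hi, ← hx]
          rw [if_neg hcond]
          rw [h1.1, h2.1]
termination_by ((seq.length : Int) - index).toNat
decreasing_by all_goals omega

-- ===== VERDICT (by name: the statement is the Claim_ definition above) =====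
theorem f_s_py_spec : Claim_equal_f_s_py := by
  intro seq cardinality last index count rising _ _
  unfold Spec_f_s_py f_s_py_alt
  have h := fsGo_correct seq cardinality PySem.Dict.empty last index count rising
    (by intro l i c r v h; simp [PySem.Dict.get?, PySem.Dict.empty] at h)
  exact h.1.symm
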